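-- pv_equiv track=rewrite | github.com/YKunlee/Financial-Research-Agent | src/finresearch_agent/chat.py | dedupe_consecutive_messages
-- ===== SOURCE A (Python) =====
-- from typing import Any
--
-- def dedupe_consecutive_messages(messages: list[dict[str, Any]]) -> list[dict[str, Any]]:
--     """Drop consecutive duplicate (role, content) messages.
--
--     If duplicates exist and a later duplicate contains a "report" while the kept
--     one doesn't, keep the "report" field.
--     """
--     out: list[dict[str, Any]] = []
--     last_key: tuple[Any, Any] | None = None
--     for msg in messages:
--         if not isinstance(msg, dict):
--             continue
--         role = msg.get("role")
--         content = msg.get("content")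
--         key = (role, content)
--         if out and key == last_key:
--             if "report" in msg and "report" not in out[-1]:
--                 out[-1]["report"] = msg["report"]
--             continue
--         out.append(msg)
--         last_key = key
--     return out
-- ===== SOURCE B (Python) =====
-- from itertools import groupby
-- from typing import Any
--
--
-- def dedupe_consecutive_messages(messages: list[dict[str, Any]]) -> list[dict[str, Any]]:
--     """Drop consecutive duplicate (role, content) messages (groupby formulation).
--
--     Mutates the kept dict in place when a later duplicate carries a "report"
--     the kept one lacks, exactly like the original.
--     """
--     out: list[dict[str, Any]] = []
--     dicts = [m for m in messages if isinstance(m, dict)]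
--     for _, group in groupby(dicts, key=lambda m: (m.get("role"), m.get("content"))):
--         kept = next(group)
--         out.append(kept)
--         if "report" not in kept:
--             for m in group:
--                 if "report" in m:
--                     kept["report"] = m["report"]
--                     break
--     return out
-- ===== Notes on version B (the rewrite author's own statement) =====
-- stated objective: idiomatic
-- what changed: Replaced the single-pass loop with manual last_key tracking by an itertools.groupby run-decomposition: consecutive equal (role, content) messages are clustered, the first dict of each run is kept, and the first later 'report' in the run is merged into it.
import Mathlib
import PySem

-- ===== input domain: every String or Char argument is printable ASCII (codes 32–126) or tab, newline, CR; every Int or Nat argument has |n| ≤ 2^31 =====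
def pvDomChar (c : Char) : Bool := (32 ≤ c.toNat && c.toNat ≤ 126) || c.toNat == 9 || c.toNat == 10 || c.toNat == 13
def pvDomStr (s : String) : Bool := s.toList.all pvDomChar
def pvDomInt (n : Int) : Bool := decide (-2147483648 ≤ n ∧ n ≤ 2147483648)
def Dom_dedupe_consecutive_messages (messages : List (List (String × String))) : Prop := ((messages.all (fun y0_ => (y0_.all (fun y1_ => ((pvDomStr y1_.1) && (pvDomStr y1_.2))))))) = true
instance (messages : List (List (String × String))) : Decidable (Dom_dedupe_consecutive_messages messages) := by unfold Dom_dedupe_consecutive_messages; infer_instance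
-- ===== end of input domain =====

-- B replaces A's manual last_key loop by a groupby run-decomposition (same cost, more idiomatic);
-- equivalence is about the returned value (both Pythons mutate the kept dicts in place identically).

-- ===== PORT A =====
-- dicts are association lists; msg.get(k) is first-match lookup (exact for dicts, whose keys are unique)
def pvA_get (m : List (String × String)) (k : String) : Option String :=
  (m.find? (fun p => p.1 == k)).map (·.2)

-- the loop over `messages` with state (out, last_key); every element is a dict under the type
-- convention, so the `isinstance` skip never fires. out[-1]["report"] = v appends ("report", v)
-- to the last dict (the guard ensures the key is absent, so Python appends it) — exact.
def pvA_loop : List (List (String × String)) → List (List (String × String)) →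
    Option (Option String × Option String) → List (List (String × String))
  | [], out, _ => out
  | msg :: rest, out, lastKey =>
    let key := (pvA_get msg "role", pvA_get msg "content")
    if out ≠ [] ∧ some key = lastKey then
      let out' :=
        if (msg.any (fun p => p.1 == "report")) ∧
           ¬ ((out.getLast?.getD []).any (fun p => p.1 == "report")) then
          out.dropLast ++ [(out.getLast?.getD []) ++ [("report", (pvA_get msg "report").getD "")]]
        else out
      pvA_loop rest out' lastKey
    else pvA_loop rest (out ++ [msg]) (some key)

def dedupe_consecutive_messages (messages : List (List (String × String))) : List (List (String × String)) :=
  pvA_loop messages [] none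

-- ===== PORT B =====
def pvB_key (m : List (String × String)) : Option String × Option String :=
  ((m.find? (fun p => p.1 == "role")).map (·.2), (m.find? (fun p => p.1 == "content")).map (·.2))

-- 'if "report" not in kept: first m in group with "report" gets its report copied in' — the
-- inner for/break is find?; kept["report"] = m["report"] appends the absent key (exact).
def pvB_merge (kept : List (String × String)) (run : List (List (String × String))) : List (String × String) :=
  if kept.any (fun p => p.1 == "report") then kept
  else
    match run.find? (fun m => m.any (fun p => p.1 == "report")) with
    | some m => kept ++ [("report", ((m.find? (fun p => p.1 == "report")).map (·.2)).getD "")]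
    | none => kept

-- groupby: each group is the head plus the maximal run of following equal-keyed messages
def dedupe_consecutive_messages_alt (messages : List (List (String × String))) : List (List (String × String)) :=
  match messages with
  | [] => []
  | h :: t =>
    pvB_merge h (t.takeWhile (fun m => pvB_key m == pvB_key h)) ::
      dedupe_consecutive_messages_alt (t.dropWhile (fun m => pvB_key m == pvB_key h))
termination_by messages.length
decreasing_by
  simp only [List.length_cons]
  exact Nat.lt_succ_of_le (List.length_dropWhile_le _ _)

-- ===== PRECONDITION & SPEC =====
def Spec_dedupe_consecutive_messages (messages : List (List (String × String))) (out : List (List (String × String))) : Prop := out = dedupe_consecutive_messages_alt messages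
instance (messages : List (List (String × String))) (out : List (List (String × String))) : Decidable (Spec_dedupe_consecutive_messages messages out) := by unfold Spec_dedupe_consecutive_messages; infer_instance

-- ===== CLAIM (what is proved, stated in full; the proofs are below) =====
def Claim_equal_dedupe_consecutive_messages : Prop := ∀ (messages : List (List (String × String))), Dom_dedupe_consecutive_messages messages → Spec_dedupe_consecutive_messages messages (dedupe_consecutive_messages messages)

-- ===== LEMMAS AND PROOFS =====

lemma alt_cons (h : List (String × String)) (t : List (List (String × String))) :
    dedupe_consecutive_messages_alt (h :: t) =
      pvB_merge h (t.takeWhile (fun m => pvB_key m == pvB_key h)) ::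
        dedupe_consecutive_messages_alt (t.dropWhile (fun m => pvB_key m == pvB_key h)) := by
  rw [dedupe_consecutive_messages_alt]

-- appending a "report" entry does not change role/content lookups
-- appending a "report" entry does not change role/content lookups
lemma key_append_report (h : List (String × String)) (v : String) :
    pvB_key (h ++ [("report", v)]) = pvB_key h := by
  simp [pvB_key, List.find?_append]

lemma merge_nil (h : List (String × String)) : pvB_merge h [] = h := by
  simp [pvB_merge]

-- the main invariant: running A's loop from state (acc ++ [h], key h) yields acc, then the
-- merged head of the current run, then B's result on what follows the run
lemma loop_eq (t : List (List (String × String))) :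
    ∀ (acc : List (List (String × String))) (h : List (String × String)),
    pvA_loop t (acc ++ [h]) (some (pvB_key h)) =
      acc ++ pvB_merge h (t.takeWhile (fun m => pvB_key m == pvB_key h)) ::
        dedupe_consecutive_messages_alt (t.dropWhile (fun m => pvB_key m == pvB_key h)) := by
  induction t with
  | nil => intro acc h; simp [pvA_loop, merge_nil, dedupe_consecutive_messages_alt]
  | cons m t ih =>
    intro acc h
    by_cases hk : pvB_key m = pvB_key h
    · -- same key: m is merged into the last element (h) and dropped
      have hkey : (pvA_get m "role", pvA_get m "content") = pvB_key h := by
        rw [← hk]; rfl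
      have hb : (pvB_key m == pvB_key h) = true := by simp [hk]
      rw [pvA_loop]
      simp only [List.getLast?_concat, Option.getD_some, List.dropLast_concat]
      rw [if_pos ⟨by simp, by rw [hkey]⟩,
        List.takeWhile_cons_of_pos (p := fun m => pvB_key m == pvB_key h) (l := t) hb,
        List.dropWhile_cons_of_pos (p := fun m => pvB_key m == pvB_key h) (l := t) hb]
      by_cases hr : (h.any (fun p => p.1 == "report")) = true
      · -- kept already has a report: nothing merged
        rw [if_neg (by simp [hr]), ih acc h]
        simp [pvB_merge, hr]
      · by_cases hm : (m.any (fun p => p.1 == "report")) = true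
        · -- first later report: merged into h
          rw [if_pos ⟨hm, hr⟩]
          have happ := ih acc (h ++ [("report", (pvA_get m "report").getD "")])
          rw [key_append_report] at happ
          rw [happ]
          simp [pvB_merge, hr, hm, pvA_get]
        · -- neither has a report: the duplicate is simply dropped
          rw [if_neg (by simp [hm]), ih acc h]
          simp [pvB_merge, hr, hm]
    · -- new key: h's run ends, m starts a new run
      have hkey : ¬ ((pvA_get m "role", pvA_get m "content") = pvB_key h) := by
        intro hc; exact hk (by rw [← hc]; rfl)
      have hb : (pvB_key m == pvB_key h) = false := by simp [hk]
      rw [pvA_loop]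
      rw [if_neg (by simp [hkey]),
        List.takeWhile_cons_of_neg (p := fun m => pvB_key m == pvB_key h) (l := t) (by simp [hb]),
        List.dropWhile_cons_of_neg (p := fun m => pvB_key m == pvB_key h) (l := t) (by simp [hb]),
        merge_nil, alt_cons,
        show (pvA_get m "role", pvA_get m "content") = pvB_key m from rfl,
        ih (acc ++ [h]) m]
      simp

-- ===== VERDICT (by name: the statement is the Claim_ definition above) =====
theorem dedupe_consecutive_messages_spec : Claim_equal_dedupe_consecutive_messages := by
  intro messages _
  unfold Spec_dedupe_consecutive_messages dedupe_consecutive_messages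
  cases messages with
  | nil => simp [pvA_loop, dedupe_consecutive_messages_alt]
  | cons h t =>
    rw [pvA_loop, if_neg (by simp),
      show (pvA_get h "role", pvA_get h "content") = pvB_key h from rfl,
      loop_eq t [] h, alt_cons]
    simp
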